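-- pv_equiv track=rewrite | github.com/Strilanc/honeycomb-boundaries | src/hcb/codes/honeycomb/layout.py | unsheared_size_for_code_distance
-- ===== SOURCE A (Python) =====
-- from typing import List, Tuple, Iterable, FrozenSet, Optional, Dict, AbstractSet
--
-- def unsheared_size_for_code_distance(distance: int,
--                                      gate_set: str) -> Tuple[int, int]:
--     if gate_set in ['EM3_v1', 'EM3_v2']:
--         return distance * 2, distance * 3
--     if gate_set in ['SD6', 'SI1000']:
--         w = distance + 1
--         h = distance * 2
--         while h % 3:
--             h += 1
--         assert h % 3 == 0, str(h)
--         return w, h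
--     raise NotImplementedError()
-- ===== SOURCE B (Python) =====
-- def unsheared_size_for_code_distance(distance, gate_set):
--     if gate_set in ('EM3_v1', 'EM3_v2'):
--         return distance * 2, distance * 3
--     if gate_set in ('SD6', 'SI1000'):
--         return distance + 1, distance * 2 + (-(distance * 2)) % 3
--     raise NotImplementedError()
-- ===== Notes on version B (the rewrite author's own statement) =====
-- stated objective: simpler
-- what changed: The while-loop that rounds distance*2 up to the next multiple of 3 is replaced by the closed-form expression distance*2 + (-(distance*2)) % 3, so B has no loop at all.
import Mathlib
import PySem

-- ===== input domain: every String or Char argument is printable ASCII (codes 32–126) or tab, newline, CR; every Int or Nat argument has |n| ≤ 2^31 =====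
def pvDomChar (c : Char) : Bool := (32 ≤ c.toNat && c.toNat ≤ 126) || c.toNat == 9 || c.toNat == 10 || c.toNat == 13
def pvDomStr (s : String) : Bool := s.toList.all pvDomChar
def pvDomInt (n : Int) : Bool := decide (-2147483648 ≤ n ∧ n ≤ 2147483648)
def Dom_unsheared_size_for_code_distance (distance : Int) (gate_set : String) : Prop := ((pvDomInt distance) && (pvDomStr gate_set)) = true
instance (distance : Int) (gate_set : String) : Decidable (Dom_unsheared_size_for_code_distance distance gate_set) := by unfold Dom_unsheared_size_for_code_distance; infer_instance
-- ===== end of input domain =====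

-- B replaces A's round-up-to-multiple-of-3 while-loop by the closed form d*2 + (-(d*2)) % 3 (objective: simpler).


-- ===== PORT A =====
-- the `while h % 3: h += 1` loop, transliterated (Python `%` with positive divisor = Lean emod, via
-- PySem.Int.mod); the fuel argument only makes the recursion structural: `h % 3` cycles to 0 within 3
-- steps, so fuel 3 never runs out and the loop body is executed exactly as in Python
def pvRoundLoopA : Nat → Int → Int
  | 0, h => h
  | fuel + 1, h => if PySem.Int.mod h 3 ≠ 0 then pvRoundLoopA fuel (h + 1) else h

def unsheared_size_for_code_distance (distance : Int) (gate_set : String) : Int × Int :=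
  if gate_set = "EM3_v1" ∨ gate_set = "EM3_v2" then
    (distance * 2, distance * 3)
  else if gate_set = "SD6" ∨ gate_set = "SI1000" then
    let w := distance + 1
    let h := distance * 2
    (w, pvRoundLoopA 3 h)
  else
    (0, 0)  -- unreachable under Pre_ (Python raises NotImplementedError)

-- ===== PORT B =====
def unsheared_size_for_code_distance_alt (distance : Int) (gate_set : String) : Int × Int :=
  if gate_set = "EM3_v1" ∨ gate_set = "EM3_v2" then
    (distance * 2, distance * 3)
  else if gate_set = "SD6" ∨ gate_set = "SI1000" then
    (distance + 1, distance * 2 + PySem.Int.mod (-(distance * 2)) 3)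
  else
    (0, 0)  -- unreachable under Pre_ (Python raises NotImplementedError)

-- ===== PRECONDITION & SPEC =====
-- Pre_ excludes exactly the gate sets on which A raises NotImplementedError.
def Pre_unsheared_size_for_code_distance (distance : Int) (gate_set : String) : Prop :=
  gate_set = "EM3_v1" ∨ gate_set = "EM3_v2" ∨ gate_set = "SD6" ∨ gate_set = "SI1000"
instance (distance : Int) (gate_set : String) : Decidable (Pre_unsheared_size_for_code_distance distance gate_set) := by unfold Pre_unsheared_size_for_code_distance; infer_instance

def pvWitness_unsheared_size_for_code_distance : Int × String := (5, "SD6")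

def Spec_unsheared_size_for_code_distance (distance : Int) (gate_set : String) (out : Int × Int) : Prop := out = unsheared_size_for_code_distance_alt distance gate_set
instance (distance : Int) (gate_set : String) (out : Int × Int) : Decidable (Spec_unsheared_size_for_code_distance distance gate_set out) := by unfold Spec_unsheared_size_for_code_distance; infer_instance

-- ===== CLAIM (what is proved, stated in full; the proofs are below) =====
def Claim_equal_unsheared_size_for_code_distance : Prop := ∀ (distance : Int) (gate_set : String), Dom_unsheared_size_for_code_distance distance gate_set → Pre_unsheared_size_for_code_distance distance gate_set → Spec_unsheared_size_for_code_distance distance gate_set (unsheared_size_for_code_distance distance gate_set)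

-- ===== LEMMAS AND PROOFS =====
lemma pvRoundLoopA_closed (h : Int) : pvRoundLoopA 3 h = h + PySem.Int.mod (-h) 3 := by
  have h3 : (0:Int) < 3 := by omega
  have hm := PySem.Int.mod_eq_emod_of_pos h3 (a := h)
  have hm1 := PySem.Int.mod_eq_emod_of_pos h3 (a := h + 1)
  have hm2 := PySem.Int.mod_eq_emod_of_pos h3 (a := h + 1 + 1)
  have hmn := PySem.Int.mod_eq_emod_of_pos h3 (a := -h)
  have hb : h % 3 = 0 ∨ h % 3 = 1 ∨ h % 3 = 2 := by omega
  simp only [pvRoundLoopA, hm, hm1, hm2, hmn]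
  rcases hb with hb | hb | hb <;> simp [hb] <;> omega

-- ===== VERDICT (by name: the statement is the Claim_ definition above) =====
theorem unsheared_size_for_code_distance_spec : Claim_equal_unsheared_size_for_code_distance := by
  intro distance gate_set _ hpre
  unfold Spec_unsheared_size_for_code_distance unsheared_size_for_code_distance
    unsheared_size_for_code_distance_alt
  rcases hpre with h | h | h | h <;> simp [h, pvRoundLoopA_closed]
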